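-- pv_equiv track=rewrite | github.com/Domiko7/competitive-programming | practice/logia/ile2017⁄2018.py | ile
-- ===== SOURCE A (Python) =====
-- def ile(kwota):
--     monety = []
--     i = 1
--     while i < kwota:
--         monety.append(i)
--         i *= 3
--     akcje = 0
--     for i in monety[::-1]:
--         miesci = kwota // i
--         kwota -= i * miesci
--         akcje += miesci
--     return akcje
-- ===== SOURCE B (Python) =====
-- def ile(kwota):
--     p = 1
--     while p * 3 < kwota:
--         p *= 3
--     if p >= kwota:
--         return 0
--     akcje = kwota // p
--     kwota %= p
--     while kwota:
--         akcje += kwota % 3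
--         kwota //= 3
--     return akcje
-- ===== Notes on version B (the rewrite author's own statement) =====
-- stated objective: alternative
-- what changed: B drops A's explicit coin list (build powers of 3 upward, reverse, greedy divide): it locates the largest power of 3 below kwota, takes one quotient there, and sums the base-3 digits of the remainder with a modulo loop.
import Mathlib
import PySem

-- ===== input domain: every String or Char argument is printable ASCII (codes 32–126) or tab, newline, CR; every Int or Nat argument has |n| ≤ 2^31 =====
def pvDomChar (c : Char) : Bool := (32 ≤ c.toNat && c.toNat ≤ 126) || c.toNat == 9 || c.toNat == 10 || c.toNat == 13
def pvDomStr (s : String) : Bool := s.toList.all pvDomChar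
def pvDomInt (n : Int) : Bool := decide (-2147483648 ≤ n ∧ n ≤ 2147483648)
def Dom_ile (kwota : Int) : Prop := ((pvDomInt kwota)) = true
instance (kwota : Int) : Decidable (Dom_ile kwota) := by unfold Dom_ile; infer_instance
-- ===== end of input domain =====

-- B replaces A's build-coin-list-then-greedy-divide with locating the top power of 3
-- and summing base-3 digits of the remainder (alternative decomposition, same cost).

-- ===== PORT A =====
-- the `while i < kwota` list-building loop; the guard 1 ≤ i only makes the
-- recursion total (A always starts at i = 1 and triples, so it never fires differently)
def ileCoins (kwota i : Int) : List Int :=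
  if _h : 1 ≤ i ∧ i < kwota then i :: ileCoins kwota (i * 3) else []
termination_by (kwota - i).toNat
decreasing_by omega

-- the `for i in monety[::-1]` loop; state = (kwota, akcje)
def ileLoop : List Int → Int × Int → Int × Int
  | [], s => s
  | c :: rest, (kw, ak) =>
      ileLoop rest (kw - c * PySem.Int.floordiv kw c, ak + PySem.Int.floordiv kw c)

def ile (kwota : Int) : Int := (ileLoop ((ileCoins kwota 1).reverse) (kwota, 0)).2

-- ===== PORT B =====
-- `p = 1; while p * 3 < kwota: p *= 3` (guard 1 ≤ p only for totality, as above)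
def topPow (kwota p : Int) : Int :=
  if _h : 1 ≤ p ∧ p * 3 < kwota then topPow kwota (p * 3) else p
termination_by (kwota - p).toNat
decreasing_by omega

-- `while kwota: akcje += kwota % 3; kwota //= 3` (reached only with kwota ≥ 0,
-- so the totality guard 0 < kwota agrees with Python's `while kwota`)
def digitSum (kwota akcje : Int) : Int :=
  if _h : 0 < kwota then
    digitSum (PySem.Int.floordiv kwota 3) (akcje + PySem.Int.mod kwota 3)
  else akcje
termination_by kwota.toNat
decreasing_by rw [PySem.Int.floordiv_eq_ediv_of_pos (by norm_num)]; omega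

def ile_alt (kwota : Int) : Int :=
  let p := topPow kwota 1
  if p ≥ kwota then 0
  else digitSum (PySem.Int.mod kwota p) (PySem.Int.floordiv kwota p)

-- ===== PRECONDITION & SPEC =====
def Spec_ile (kwota : Int) (out : Int) : Prop := out = ile_alt kwota
instance (kwota : Int) (out : Int) : Decidable (Spec_ile kwota out) := by unfold Spec_ile; infer_instance

-- ===== CLAIM (what is proved, stated in full; the proofs are below) =====
def Claim_equal_ile : Prop := ∀ (kwota : Int), Dom_ile kwota → Spec_ile kwota (ile kwota)

-- ===== LEMMAS AND PROOFS =====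

-- targeted one-step unfolding lemmas for the four loops
theorem ileCoins_pos {kwota i : Int} (h : 1 ≤ i ∧ i < kwota) :
    ileCoins kwota i = i :: ileCoins kwota (i * 3) := by rw [ileCoins, dif_pos h]
theorem ileCoins_neg {kwota i : Int} (h : ¬(1 ≤ i ∧ i < kwota)) :
    ileCoins kwota i = [] := by rw [ileCoins, dif_neg h]
theorem digitSum_step {k a : Int} (h : 0 < k) :
    digitSum k a = digitSum (k / 3) (a + k % 3) := by
  rw [digitSum, dif_pos h, PySem.Int.floordiv_eq_ediv_of_pos (by norm_num),
    PySem.Int.mod_eq_emod_of_pos (by norm_num)]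
theorem digitSum_stop {k a : Int} (h : ¬0 < k) : digitSum k a = a := by
  rw [digitSum, dif_neg h]

-- topPow kwota i is i times a power of 3, the loop stops with kwota ≤ 3·t,
-- and stays below kwota whenever it started below it
theorem topPow_spec (kwota i : Int) (hi : 1 ≤ i) :
    ∃ m : Nat, topPow kwota i = i * 3 ^ m ∧ kwota ≤ i * 3 ^ m * 3 ∧
      (i < kwota → i * 3 ^ m < kwota) := by
  fun_induction topPow kwota i with
  | case1 p h ih =>
      obtain ⟨m, hm, hle, hlt⟩ := ih (by omega)
      exact ⟨m + 1, by rw [hm]; ring, by rw [pow_succ]; linarith [hle], by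
        intro _; have := hlt (by omega); rw [pow_succ]; linarith⟩
  | case2 p h =>
      refine ⟨0, by ring, ?_, by intro hp; simpa using hp⟩
      simp only [pow_zero, mul_one]
      omega

-- the coin list with bound kwota, when i·3^m < kwota ≤ 3·i·3^m, is the coin
-- list with bound i·3^m plus the top coin i·3^m appended
theorem ileCoins_append (m : Nat) :
    ∀ (i kwota : Int), 1 ≤ i → i * 3 ^ m < kwota → kwota ≤ i * 3 ^ m * 3 →
    ileCoins kwota i = ileCoins (i * 3 ^ m) i ++ [i * 3 ^ m] := by
  induction m with
  | zero =>
      intro i kwota hi hlo hhi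
      simp only [pow_zero, mul_one] at *
      rw [ileCoins_pos ⟨hi, hlo⟩, ileCoins_neg (by omega),
        ileCoins_neg (show ¬(1 ≤ i ∧ i < i) by omega)]
      rfl
  | succ m ih =>
      intro i kwota hi hlo hhi
      have h3 : (1:Int) ≤ 3 ^ m := one_le_pow₀ (by norm_num)
      have hkey : i * 3 ^ (m + 1) = (i * 3) * 3 ^ m := by ring
      have hii : i < i * 3 ^ (m + 1) := by
        have : i * 1 < i * 3 ^ (m + 1) := by
          apply mul_lt_mul_of_pos_left _ (by omega)
          have : (3:Int) ^ (m+1) = 3 ^ m * 3 := pow_succ 3 m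
          omega
        simpa using this
      have hik : i < kwota := lt_trans hii hlo
      rw [ileCoins_pos ⟨hi, hik⟩]
      rw [ih (i * 3) kwota (by omega) (by rw [← hkey]; exact hlo)
        (by rw [← hkey]; exact hhi)]
      conv_rhs => rw [ileCoins_pos ⟨hi, hii⟩]
      rw [← hkey]
      rfl

-- helper: (s % 3^(m+1)) / 3 = (s / 3) % 3^m
theorem emod_pow_succ_ediv_three (m : Nat) (s : Int) :
    s % 3 ^ (m + 1) / 3 = s / 3 % 3 ^ m := by
  have hq : s % 3 ^ (m + 1) = s + 3 * -(3 ^ m * (s / 3 ^ (m + 1))) := by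
    rw [Int.emod_def, pow_succ]; ring
  rw [hq, Int.add_mul_ediv_left s _ (by norm_num)]
  rw [Int.emod_def (s / 3), Int.ediv_ediv_of_nonneg (by norm_num : (0:Int) ≤ 3),
    ← pow_succ']
  rw [pow_succ']
  ring_nf

-- peeling the TOP base-3 digit out of digitSum (digitSum itself peels bottom digits)
theorem digitSum_peel (m : Nat) :
    ∀ (s b : Int), 0 ≤ s → s < 3 ^ (m + 1) →
    digitSum s b = digitSum (s % 3 ^ m) (b + s / 3 ^ m) := by
  induction m with
  | zero =>
      intro s b hs hlt
      simp only [pow_zero] at *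
      rw [Int.emod_one, Int.ediv_one]
      by_cases h0 : 0 < s
      · rw [digitSum_step h0]
        have h1 : s / 3 = 0 := by omega
        have h2 : s % 3 = s := by omega
        rw [h1, h2]
      · have : s = 0 := by omega
        subst this
        rw [digitSum_stop h0, digitSum_stop h0]
        omega
  | succ m ih =>
      intro s b hs hlt
      have hp : (0:Int) < 3 ^ (m + 1) := by positivity
      have hdvd : (3:Int) ∣ 3 ^ (m + 1) := ⟨3 ^ m, by rw [pow_succ']⟩
      by_cases h0 : 0 < s
      · rw [digitSum_step h0]
        have hdiv3 : s / 3 < 3 ^ (m + 1) := by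
          rw [Int.ediv_lt_iff_lt_mul (by norm_num)]
          calc s < 3 ^ (m + 1 + 1) := hlt
          _ = 3 ^ (m + 1) * 3 := by rw [pow_succ]
        rw [ih (s / 3) (b + s % 3) (by positivity) hdiv3]
        -- RHS: unfold one step of digitSum at s % 3^(m+2)
        have hmod : s % 3 ^ (m + 1 + 1) % 3 = s % 3 :=
          Int.emod_emod_of_dvd s ⟨3 ^ (m + 1), by rw [pow_succ']⟩
        have hdd : s / 3 / 3 ^ m = s / 3 ^ (m + 1) := by
          rw [Int.ediv_ediv_of_nonneg (by norm_num : (0:Int) ≤ 3), ← pow_succ']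
        have hmd : s % 3 ^ (m + 1) / 3 = s / 3 % 3 ^ m := emod_pow_succ_ediv_three m s
        by_cases hz : 0 < s % 3 ^ (m + 1)
        · conv_rhs => rw [digitSum_step hz]
          rw [hmd, Int.emod_emod_of_dvd s hdvd, hdd]
          congr 1
          ring
        · have hz0 : s % 3 ^ (m + 1) = 0 := by
            have := Int.emod_nonneg s (ne_of_gt hp)
            omega
          have h1 : s / 3 % 3 ^ m = 0 := by rw [← hmd, hz0]; simp
          have h2 : s % 3 = 0 := by
            rw [← Int.emod_emod_of_dvd s hdvd, hz0]; simp
          rw [h1, h2, hz0, hdd, digitSum_stop (by omega),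
            digitSum_stop (by omega)]
          ring
      · have : s = 0 := by omega
        subst this
        simp only [Int.zero_emod, Int.zero_ediv, add_zero]

-- the greedy descending pass over the coin list [1,3,…,3^m] equals
-- top-quotient plus digit sum of the remainder
theorem greedy_eq_digitSum (m : Nat) :
    ∀ (kwota r a : Int), 3 ^ m < kwota → kwota ≤ 3 ^ m * 3 → 0 ≤ r →
    (ileLoop ((ileCoins kwota 1).reverse) (r, a)).2 =
      digitSum (r % 3 ^ m) (a + r / 3 ^ m) := by
  induction m with
  | zero =>
      intro kwota r a hlo hhi hr
      have hc : ileCoins kwota 1 = [1] := by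
        have h := ileCoins_append 0 1 kwota (by omega) (by simpa using hlo)
          (by simpa using hhi)
        simp only [pow_zero, mul_one] at h
        rw [h, ileCoins_neg (show ¬((1:Int) ≤ 1 ∧ (1:Int) < 1) by omega)]
        rfl
      rw [hc]
      simp only [pow_zero, Int.emod_one, Int.ediv_one, List.reverse_cons,
        List.reverse_nil, List.nil_append]
      rw [ileLoop, PySem.Int.floordiv_eq_ediv_of_pos (by norm_num : (0:Int) < 1)]
      rw [Int.ediv_one, ileLoop]
      rw [digitSum_stop (by omega)]
  | succ m ih =>
      intro kwota r a hlo hhi hr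
      have hp : (0:Int) < 3 ^ (m + 1) := by positivity
      have hc := ileCoins_append (m + 1) 1 kwota (by omega)
        (by simpa using hlo) (by simpa using hhi)
      rw [one_mul] at hc
      rw [hc, List.reverse_append, List.reverse_singleton, List.singleton_append,
        ileLoop, PySem.Int.floordiv_eq_ediv_of_pos hp]
      have hstate : r - 3 ^ (m + 1) * (r / 3 ^ (m + 1)) = r % 3 ^ (m + 1) :=
        (Int.emod_def r _).symm
      rw [hstate]
      have hple : (3:Int) ^ m < 3 ^ (m + 1) := by
        rw [pow_succ]
        have : (0:Int) < 3 ^ m := by positivity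
        omega
      rw [ih (3 ^ (m + 1)) (r % 3 ^ (m + 1)) (a + r / 3 ^ (m + 1)) hple
        (le_of_eq (pow_succ 3 m)) (Int.emod_nonneg r (ne_of_gt hp))]
      exact (digitSum_peel m (r % 3 ^ (m + 1)) (a + r / 3 ^ (m + 1))
        (Int.emod_nonneg r (ne_of_gt hp)) (Int.emod_lt_of_pos r hp)).symm

-- ===== VERDICT (by name: the statement is the Claim_ definition above) =====
theorem ile_spec : Claim_equal_ile := by
  intro kwota _
  unfold Spec_ile
  by_cases hk : kwota ≤ 1
  · -- no coin below kwota: both sides are 0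
    unfold ile ile_alt
    rw [ileCoins_neg (by omega), topPow, dif_neg (by omega)]
    simp only [List.reverse_nil]
    rw [ileLoop, if_pos (by omega : (1:Int) ≥ kwota)]
  · have hk1 : 1 < kwota := by omega
    obtain ⟨m, hm, hle, hlt⟩ := topPow_spec kwota 1 (by omega)
    rw [one_mul] at hm hle hlt
    have hlt' := hlt hk1
    have hp : (0:Int) < 3 ^ m := by positivity
    unfold ile ile_alt
    rw [hm, if_neg (by omega),
      PySem.Int.floordiv_eq_ediv_of_pos hp, PySem.Int.mod_eq_emod_of_pos hp]
    rw [greedy_eq_digitSum m kwota kwota 0 hlt' hle (by omega)]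
    rw [zero_add]
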